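-- pv_equiv track=rewrite | github.com/glwlg/X-bot | src/ikaros/integrations/gh_cli_service.py | _looks_like_auth_missing
-- ===== SOURCE A (Python) =====
-- def _looks_like_auth_missing(text: str) -> bool:
--     lowered = str(text or "").lower()
--     return any(
--         token in lowered
--         for token in (
--             "not logged into",
--             "authentication required",
--             "try authenticating with",
--             "gh auth login",
--         )
--     )
-- ===== SOURCE B (Python) =====
-- _TOKENS = (
--     "not logged into",
--     "authentication required",
--     "try authenticating with",
--     "gh auth login",
-- )
--
--
-- def _looks_like_auth_missing(text: str) -> bool:
--     lowered = str(text or "").lower()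
--     # Streaming multi-pattern matcher: each character of the text is read exactly
--     # once; for every token we maintain the set of prefix lengths of that token
--     # currently matching a suffix of the text read so far (an NFA simulation).
--     states = [(tok, set()) for tok in _TOKENS]
--     for ch in lowered:
--         new_states = []
--         for tok, act in states:
--             nxt = {p + 1 for p in act if p < len(tok) and tok[p] == ch}
--             if tok[0] == ch:
--                 nxt.add(1)
--             if len(tok) in nxt:
--                 return True
--             new_states.append((tok, nxt))
--         states = new_states
--     return False
-- ===== Notes on version B (the rewrite author's own statement) =====
-- stated objective: alternative
-- what changed: Replaces A's four independent substring scans under any() with a streaming multi-pattern matcher that reads each character once while maintaining, per token, the set of prefix lengths currently matching a suffix of the text seen so far (an NFA simulation).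
import Mathlib
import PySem

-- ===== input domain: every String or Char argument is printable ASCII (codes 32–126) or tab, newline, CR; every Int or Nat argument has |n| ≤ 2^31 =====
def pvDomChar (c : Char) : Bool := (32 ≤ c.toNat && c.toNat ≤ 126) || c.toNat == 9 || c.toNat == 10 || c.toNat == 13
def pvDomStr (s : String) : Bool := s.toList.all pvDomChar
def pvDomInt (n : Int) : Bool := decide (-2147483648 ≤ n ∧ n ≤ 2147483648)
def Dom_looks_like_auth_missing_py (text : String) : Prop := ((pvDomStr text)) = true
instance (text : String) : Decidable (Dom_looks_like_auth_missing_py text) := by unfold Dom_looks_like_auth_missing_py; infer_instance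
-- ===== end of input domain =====

-- B replaces A's four independent substring scans by a streaming multi-pattern
-- matcher (per-token active prefix-length sets, each character read once); objective: alternative.

-- ===== PORT A =====
-- literal port of Source A: lowered = str(text or "").lower(); any(token in lowered for token in (...))
def looks_like_auth_missing_py (text : String) : Bool :=
  let lowered := PySem.Str.lower (if text == "" then "" else text)
  (["not logged into", "authentication required", "try authenticating with",
    "gh auth login"] : List String).any (fun token => PySem.Str.isIn token lowered)

-- ===== PORT B =====
-- Source B's per-token step: advance every active prefix length by one where the token's
-- next character is ch, and start a fresh match of length 1 when tok[0] == ch.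
-- (tok[0]: the tokens are nonempty string literals, so Python's tok[0] never raises;
-- headD ' ' is exact on every state this program builds.)
def pvAuthStep (st : List Char × List Nat) (ch : Char) : List Char × List Nat :=
  let nxt := (st.2.filter (fun p => decide (p < st.1.length) && st.1.getD p ' ' == ch)).map (· + 1)
  (st.1, if st.1.headD ' ' == ch then 1 :: nxt else nxt)

-- Source B's main loop: one pass over the text; return True as soon as some token's
-- full length enters its active set.
def pvAuthScan (s : List Char) (states : List (List Char × List Nat)) : Bool :=
  match s with
  | [] => false
  | c :: rest =>
    let ns := states.map (fun st => pvAuthStep st c)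
    if ns.any (fun st => st.2.contains st.1.length) then true
    else pvAuthScan rest ns

def looks_like_auth_missing_py_alt (text : String) : Bool :=
  pvAuthScan (PySem.Str.lower (if text == "" then "" else text)).toList
    ((["not logged into".toList, "authentication required".toList,
       "try authenticating with".toList, "gh auth login".toList]).map (fun t => (t, ([] : List Nat))))

-- ===== PRECONDITION & SPEC =====
def Spec_looks_like_auth_missing_py (text : String) (out : Bool) : Prop := out = looks_like_auth_missing_py_alt text
instance (text : String) (out : Bool) : Decidable (Spec_looks_like_auth_missing_py text out) := by unfold Spec_looks_like_auth_missing_py; infer_instance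

-- ===== CLAIM (what is proved, stated in full; the proofs are below) =====
def Claim_equal_looks_like_auth_missing_py : Prop := ∀ (text : String), Dom_looks_like_auth_missing_py text → Spec_looks_like_auth_missing_py text (looks_like_auth_missing_py text)

-- ===== LEMMAS AND PROOFS =====

-- the invariant: st.2 holds exactly the prefix lengths of st.1 matching a suffix of the processed text u
def pvAuthInv (u : List Char) (st : List Char × List Nat) : Prop :=
  ∀ p, p ∈ st.2 ↔ 1 ≤ p ∧ p ≤ st.1.length ∧ st.1.take p <:+ u

theorem pv_suffix_snoc {l u : List Char} {c : Char} :
    l <:+ u ++ [c] ↔ l = [] ∨ ∃ l', l = l' ++ [c] ∧ l' <:+ u := by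
  constructor
  · rintro ⟨w, hw⟩
    rcases List.eq_nil_or_concat l with rfl | ⟨l', d, rfl⟩
    · exact Or.inl rfl
    · right
      have h2 : (w ++ l') ++ [d] = u ++ [c] := by simpa using hw
      have hd : d = c := by
        have := congrArg (fun x => x.getLast?) h2
        simpa using this
      have hu : w ++ l' = u := by
        have := congrArg (fun x => x.dropLast) h2
        simpa using this
      exact ⟨l', by simp [hd], ⟨w, hu⟩⟩
  · rintro (rfl | ⟨l', rfl, w, rfl⟩)
    · exact List.nil_suffix
    · exact ⟨w, by simp⟩

theorem pv_infix_snoc {t u : List Char} {c : Char} :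
    t <:+: u ++ [c] ↔ t <:+: u ∨ t <:+ u ++ [c] := by
  constructor
  · rintro ⟨a, b, hab⟩
    rcases List.eq_nil_or_concat b with rfl | ⟨b', d, rfl⟩
    · exact Or.inr ⟨a, by simpa using hab⟩
    · left
      have h2 : (a ++ t ++ b') ++ [d] = u ++ [c] := by simpa using hab
      have hu : a ++ t ++ b' = u := by
        have := congrArg (fun x => x.dropLast) h2
        simpa using this
      exact ⟨a, b', hu⟩
  · rintro (h | h)
    · exact h.trans (List.prefix_append u [c]).isInfix
    · exact h.isInfix

theorem pvAuthStep_inv {u : List Char} {st : List Char × List Nat} {c : Char}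
    (hne : st.1 ≠ []) (h : pvAuthInv u st) : pvAuthInv (u ++ [c]) (pvAuthStep st c) := by
  obtain ⟨t, act⟩ := st
  simp only [ne_eq] at hne
  intro p
  simp only [pvAuthStep, pvAuthInv] at *
  have hmem : p ∈ (if t.headD ' ' == c then 1 :: (act.filter (fun q => decide (q < t.length) && t.getD q ' ' == c)).map (· + 1) else (act.filter (fun q => decide (q < t.length) && t.getD q ' ' == c)).map (· + 1)) ↔
      ((t.headD ' ' = c ∧ p = 1) ∨ ∃ q ∈ act, q < t.length ∧ t.getD q ' ' = c ∧ p = q + 1) := by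
    split
    next hh =>
      simp only [List.mem_cons, List.mem_map, List.mem_filter, Bool.and_eq_true, decide_eq_true_eq, beq_iff_eq]
      constructor
      · rintro (rfl | ⟨q, ⟨hq, h1, h2⟩, rfl⟩)
        · exact Or.inl ⟨by simpa using hh, rfl⟩
        · exact Or.inr ⟨q, hq, h1, h2, rfl⟩
      · rintro (⟨_, rfl⟩ | ⟨q, hq, h1, h2, rfl⟩)
        · exact Or.inl rfl
        · exact Or.inr ⟨q, ⟨hq, h1, h2⟩, rfl⟩
    next hh =>
      simp only [beq_iff_eq] at hh
      simp only [List.mem_map, List.mem_filter, Bool.and_eq_true, decide_eq_true_eq, beq_iff_eq]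
      constructor
      · rintro ⟨q, ⟨hq, h1, h2⟩, rfl⟩
        exact Or.inr ⟨q, hq, h1, h2, rfl⟩
      · rintro (⟨hc, rfl⟩ | ⟨q, hq, h1, h2, rfl⟩)
        · exact absurd hc hh
        · exact ⟨q, ⟨hq, h1, h2⟩, rfl⟩
  rw [hmem]
  -- now relate the RHS to the suffix characterisation
  constructor
  · rintro (⟨hc, rfl⟩ | ⟨q, hq, hlt, hc, rfl⟩)
    · refine ⟨le_refl 1, ?_, ?_⟩
      · exact Nat.one_le_iff_ne_zero.mpr (by simpa [List.length_eq_zero_iff] using hne)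
      · rw [pv_suffix_snoc]
        right
        refine ⟨[], ?_, List.nil_suffix⟩
        cases t with
        | nil => exact absurd rfl hne
        | cons a t' => simp_all [List.take]
    · obtain ⟨h1, h2, h3⟩ := (h q).mp hq
      refine ⟨by omega, by omega, ?_⟩
      rw [pv_suffix_snoc]
      right
      have hc' : t[q] = c := by
        simpa [List.getD, List.getElem?_eq_getElem hlt] using hc
      refine ⟨t.take q, ?_, h3⟩
      rw [List.take_add_one, List.getElem?_eq_getElem hlt, hc']
      simp
  · rintro ⟨h1, h2, h3⟩
    rw [pv_suffix_snoc] at h3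
    rcases h3 with h3 | ⟨l', hl', hs⟩
    · exfalso
      have hlen0 : (List.take p t).length = 0 := by rw [h3]; rfl
      rw [List.length_take] at hlen0
      omega
    · -- t.take p = l' ++ [c]; so p ≥ 1, t[p-1] = c, t.take (p-1) = l'
      obtain ⟨p', rfl⟩ : ∃ p', p = p' + 1 := ⟨p - 1, by omega⟩
      have hlt' : p' < t.length := by omega
      have hts : t.take (p' + 1) = t.take p' ++ [t[p']] := by
        rw [List.take_add_one, List.getElem?_eq_getElem hlt']
        simp
      rw [hts] at hl'
      have hc : t[p'] = c := by
        have h4 := congrArg (fun x => x.getLast?) hl'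
        simp only [List.getLast?_concat] at h4
        exact Option.some.inj h4
      have hl'' : t.take p' = l' := by
        have h4 := congrArg (fun x => x.dropLast) hl'
        simp only [List.dropLast_concat] at h4
        exact h4
      rcases Nat.eq_zero_or_pos p' with rfl | hp'
      · left
        constructor
        · cases t with
          | nil => exact absurd rfl hne
          | cons a t' => simpa using hc
        · rfl
      · right
        refine ⟨p', (h p').mpr ⟨hp', by omega, hl'' ▸ hs⟩, hlt', ?_, rfl⟩
        simp [List.getD, List.getElem?_eq_getElem hlt', hc]

theorem pvAuthScan_iff (s : List Char) :
    ∀ (u : List Char) (states : List (List Char × List Nat)),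
    (∀ st ∈ states, st.1 ≠ []) →
    (∀ st ∈ states, pvAuthInv u st) →
    (∀ st ∈ states, ¬ st.1 <:+: u) →
    (pvAuthScan s states = true ↔ ∃ st ∈ states, st.1 <:+: u ++ s) := by
  induction s with
  | nil =>
    intro u states _ _ hni
    simp only [pvAuthScan]
    constructor
    · intro h; exact absurd h (by simp)
    · rintro ⟨st, hst, hinf⟩
      exact absurd (by simpa using hinf) (hni st hst)
  | cons c rest ih =>
    intro u states hne hinv hni
    simp only [pvAuthScan]
    have hinv' : ∀ st ∈ states.map (fun st => pvAuthStep st c), pvAuthInv (u ++ [c]) st := by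
      rintro st hst
      simp only [List.mem_map] at hst
      obtain ⟨st0, hst0, rfl⟩ := hst
      exact pvAuthStep_inv (hne st0 hst0) (hinv st0 hst0)
    have hne' : ∀ st ∈ states.map (fun st => pvAuthStep st c), st.1 ≠ [] := by
      rintro st hst
      simp only [List.mem_map] at hst
      obtain ⟨st0, hst0, rfl⟩ := hst
      simpa [pvAuthStep] using hne st0 hst0
    -- characterise the "found" test: some token is a suffix of u ++ [c]
    have hfound : ((states.map (fun st => pvAuthStep st c)).any (fun st => st.2.contains st.1.length) = true) ↔
        ∃ st0 ∈ states, st0.1 <:+ u ++ [c] := by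
      simp only [List.any_eq_true, List.mem_map]
      constructor
      · rintro ⟨st, ⟨st0, hst0, rfl⟩, hcon⟩
        have := (hinv' _ (List.mem_map.mpr ⟨st0, hst0, rfl⟩) (pvAuthStep st0 c).1.length).mp
          (by simpa [List.contains_iff_mem] using hcon)
        refine ⟨st0, hst0, ?_⟩
        have hlen : (pvAuthStep st0 c).1 = st0.1 := rfl
        rw [hlen] at this
        simpa [pvAuthStep, List.take_length] using this.2.2
      · rintro ⟨st0, hst0, hsuf⟩
        refine ⟨pvAuthStep st0 c, ⟨st0, hst0, rfl⟩, ?_⟩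
        have h1 : 1 ≤ st0.1.length :=
          List.length_pos_of_ne_nil (hne st0 hst0)
        have := (hinv' _ (List.mem_map.mpr ⟨st0, hst0, rfl⟩) st0.1.length).mpr
          ⟨h1, le_refl _, by simpa [pvAuthStep, List.take_length] using hsuf⟩
        simpa [List.contains_iff_mem] using this
    split
    next hfnd =>
      rw [hfound] at hfnd
      obtain ⟨st0, hst0, hsuf⟩ := hfnd
      simp only [true_iff]
      refine ⟨st0, hst0, ?_⟩
      have hpre : u ++ [c] <+: u ++ c :: rest := ⟨rest, by simp⟩
      exact hsuf.isInfix.trans hpre.isInfix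
    next hfnd =>
      rw [hfound] at hfnd
      push Not at hfnd
      have hni' : ∀ st ∈ states.map (fun st => pvAuthStep st c), ¬ st.1 <:+: u ++ [c] := by
        rintro st hst
        simp only [List.mem_map] at hst
        obtain ⟨st0, hst0, rfl⟩ := hst
        have : (pvAuthStep st0 c).1 = st0.1 := rfl
        rw [this, pv_infix_snoc]
        rintro (h | h)
        · exact hni st0 hst0 h
        · exact hfnd st0 hst0 h
      rw [ih (u ++ [c]) _ hne' hinv' hni']
      constructor
      · rintro ⟨st, hst, hinf⟩
        simp only [List.mem_map] at hst
        obtain ⟨st0, hst0, rfl⟩ := hst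
        have he : (pvAuthStep st0 c).1 = st0.1 := rfl
        rw [he] at hinf
        exact ⟨st0, hst0, by simpa using hinf⟩
      · rintro ⟨st0, hst0, hinf⟩
        refine ⟨pvAuthStep st0 c, List.mem_map.mpr ⟨st0, hst0, rfl⟩, ?_⟩
        have he : (pvAuthStep st0 c).1 = st0.1 := rfl
        rw [he]
        simpa using hinf

-- ===== VERDICT (by name: the statement is the Claim_ definition above) =====
theorem looks_like_auth_missing_py_spec : Claim_equal_looks_like_auth_missing_py := by
  intro text _
  unfold Spec_looks_like_auth_missing_py looks_like_auth_missing_py looks_like_auth_missing_py_alt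
  rw [Bool.eq_iff_iff]
  rw [pvAuthScan_iff _ [] _ (by decide) (by intro st hst; fin_cases hst <;> intro p <;> simp <;> omega) (by decide)]
  simp [PySem.Chars.isIn_iff_infix]
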